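-- pv_equiv track=rewrite | github.com/prathamhanda/CareSentryAi | disease_model/app.py | _recommend_doctor
-- ===== SOURCE A (Python) =====
-- def _recommend_doctor(disease: str) -> str:
--     d = (disease or "").lower()
--
--     # Keep this intentionally simple + safe: map broad categories to specialists.
--     if any(k in d for k in ("migraine", "seizure", "stroke", "neu", "headache")):
--         return "Neurologist"
--     if any(k in d for k in ("dermat", "skin", "rash", "eczema", "psoriasis")):
--         return "Dermatologist"
--     if any(k in d for k in ("asthma", "pneum", "bronch", "copd", "respir")):
--         return "Pulmonologist"
--     if any(k in d for k in ("card", "heart", "angina", "myocard", "arrhythm")):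
--         return "Cardiologist"
--     if any(k in d for k in ("diab", "thyroid", "endocr")):
--         return "Endocrinologist"
--     if any(k in d for k in ("gastro", "liver", "hepat", "ulcer", "stomach")):
--         return "Gastroenterologist"
--     if any(k in d for k in ("kidney", "renal", "uti", "urinar", "neph")):
--         return "Nephrologist"
--
--     # For common, non-specific viral/flu-like outputs
--     if any(k in d for k in ("flu", "influenza", "cold", "viral", "infection", "fever", "cough")):
--         return "General Physician"
--
--     return "General Physician"
-- ===== SOURCE B (Python) =====
-- # Single left-to-right scan over the text: at each position the highest-priority
-- # (lowest-rank) keyword starting there updates a running minimum rank; the rank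
-- # is mapped to a specialist at the end (the flu/viral group maps to the default).
-- _SPECIALISTS = ["Neurologist", "Dermatologist", "Pulmonologist", "Cardiologist",
--                 "Endocrinologist", "Gastroenterologist", "Nephrologist"]
--
-- _KEYWORD_RANK = {
--     "migraine": 0, "seizure": 0, "stroke": 0, "neu": 0, "headache": 0,
--     "dermat": 1, "skin": 1, "rash": 1, "eczema": 1, "psoriasis": 1,
--     "asthma": 2, "pneum": 2, "bronch": 2, "copd": 2, "respir": 2,
--     "card": 3, "heart": 3, "angina": 3, "myocard": 3, "arrhythm": 3,
--     "diab": 4, "thyroid": 4, "endocr": 4,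
--     "gastro": 5, "liver": 5, "hepat": 5, "ulcer": 5, "stomach": 5,
--     "kidney": 6, "renal": 6, "uti": 6, "urinar": 6, "neph": 6,
-- }
--
-- def _recommend_doctor(disease: str) -> str:
--     d = (disease or "").lower()
--     best = len(_SPECIALISTS)  # 7 = no specialist keyword seen
--     for i in range(len(d)):
--         for kw, rank in _KEYWORD_RANK.items():
--             if rank < best and d.startswith(kw, i):
--                 best = rank
--     return _SPECIALISTS[best] if best < len(_SPECIALISTS) else "General Physician"
-- ===== Notes on version B (the rewrite author's own statement) =====
-- stated objective: alternative
-- what changed: Replaces A's priority-ordered per-group substring tests by a single left-to-right scan over the text positions that keeps a running minimum keyword rank (prefix checks at each position), mapping the final rank to the specialist at the end.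
import Mathlib
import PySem

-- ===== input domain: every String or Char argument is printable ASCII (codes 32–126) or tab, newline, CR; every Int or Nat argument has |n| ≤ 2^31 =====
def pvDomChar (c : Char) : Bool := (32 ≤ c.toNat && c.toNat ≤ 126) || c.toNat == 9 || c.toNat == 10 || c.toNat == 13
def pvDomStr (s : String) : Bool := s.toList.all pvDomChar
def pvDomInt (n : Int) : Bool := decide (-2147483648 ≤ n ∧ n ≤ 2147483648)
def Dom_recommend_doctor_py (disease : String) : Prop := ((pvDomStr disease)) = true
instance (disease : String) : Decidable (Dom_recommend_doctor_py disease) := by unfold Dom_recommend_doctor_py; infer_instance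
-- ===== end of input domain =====

-- B replaces A's priority-ordered per-group substring tests by a single left-to-right
-- scan over the text positions keeping a running minimum keyword rank (prefix check at
-- each position), mapping the final rank to a specialist at the end.

-- ===== PORT A =====
def recommend_doctor_py (disease : String) : String :=
  let d := PySem.Str.lower (if disease == "" then "" else disease)
  if ["migraine", "seizure", "stroke", "neu", "headache"].any (fun k => PySem.Str.isIn k d) then
    "Neurologist"
  else if ["dermat", "skin", "rash", "eczema", "psoriasis"].any (fun k => PySem.Str.isIn k d) then
    "Dermatologist"
  else if ["asthma", "pneum", "bronch", "copd", "respir"].any (fun k => PySem.Str.isIn k d) then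
    "Pulmonologist"
  else if ["card", "heart", "angina", "myocard", "arrhythm"].any (fun k => PySem.Str.isIn k d) then
    "Cardiologist"
  else if ["diab", "thyroid", "endocr"].any (fun k => PySem.Str.isIn k d) then
    "Endocrinologist"
  else if ["gastro", "liver", "hepat", "ulcer", "stomach"].any (fun k => PySem.Str.isIn k d) then
    "Gastroenterologist"
  else if ["kidney", "renal", "uti", "urinar", "neph"].any (fun k => PySem.Str.isIn k d) then
    "Nephrologist"
  else if ["flu", "influenza", "cold", "viral", "infection", "fever", "cough"].any (fun k => PySem.Str.isIn k d) then
    "General Physician"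
  else
    "General Physician"

-- ===== PORT B =====
def pvSpecialists : List String :=
  ["Neurologist", "Dermatologist", "Pulmonologist", "Cardiologist",
   "Endocrinologist", "Gastroenterologist", "Nephrologist"]

def pvKeywordRank : List (List Char × Nat) :=
  [("migraine".toList, 0), ("seizure".toList, 0), ("stroke".toList, 0), ("neu".toList, 0), ("headache".toList, 0),
   ("dermat".toList, 1), ("skin".toList, 1), ("rash".toList, 1), ("eczema".toList, 1), ("psoriasis".toList, 1),
   ("asthma".toList, 2), ("pneum".toList, 2), ("bronch".toList, 2), ("copd".toList, 2), ("respir".toList, 2),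
   ("card".toList, 3), ("heart".toList, 3), ("angina".toList, 3), ("myocard".toList, 3), ("arrhythm".toList, 3),
   ("diab".toList, 4), ("thyroid".toList, 4), ("endocr".toList, 4),
   ("gastro".toList, 5), ("liver".toList, 5), ("hepat".toList, 5), ("ulcer".toList, 5), ("stomach".toList, 5),
   ("kidney".toList, 6), ("renal".toList, 6), ("uti".toList, 6), ("urinar".toList, 6), ("neph".toList, 6)]

-- the body of Source B's inner 'for kw, rank in _KEYWORD_RANK.items()' loop over one position i;
-- 'd.startswith(kw, i)' with 0 ≤ i is exactly a prefix test on the i-th suffix.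
def pvInner (cs : List Char) (i : Nat) (best : Nat) : Nat :=
  pvKeywordRank.foldl
    (fun best e =>
      if e.2 < best && PySem.Chars.startswith (cs.drop i) e.1 then e.2 else best)
    best

-- 'for i in range(len(d))' is the fold over List.range d.length (i = 0..len-1, exact)
def pvBestRank (cs : List Char) : Nat :=
  (List.range cs.length).foldl (fun best i => pvInner cs i best) 7

def recommend_doctor_py_alt (disease : String) : String :=
  let d := PySem.Str.lower (if disease == "" then "" else disease)
  let best := pvBestRank d.toList
  if best < 7 then pvSpecialists.getD best "General Physician" else "General Physician"

-- ===== PRECONDITION & SPEC =====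
def Spec_recommend_doctor_py (disease : String) (out : String) : Prop := out = recommend_doctor_py_alt disease
instance (disease : String) (out : String) : Decidable (Spec_recommend_doctor_py disease out) := by unfold Spec_recommend_doctor_py; infer_instance

-- ===== CLAIM (what is proved, stated in full; the proofs are below) =====
def Claim_equal_recommend_doctor_py : Prop := ∀ (disease : String), Dom_recommend_doctor_py disease → Spec_recommend_doctor_py disease (recommend_doctor_py disease)

-- ===== LEMMAS AND PROOFS =====

-- A's group-g keyword list
def pvGroupKws : Nat → List String
  | 0 => ["migraine", "seizure", "stroke", "neu", "headache"]
  | 1 => ["dermat", "skin", "rash", "eczema", "psoriasis"]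
  | 2 => ["asthma", "pneum", "bronch", "copd", "respir"]
  | 3 => ["card", "heart", "angina", "myocard", "arrhythm"]
  | 4 => ["diab", "thyroid", "endocr"]
  | 5 => ["gastro", "liver", "hepat", "ulcer", "stomach"]
  | 6 => ["kidney", "renal", "uti", "urinar", "neph"]
  | _ => []

-- A's group-g condition, on the char-list side
def pvGroupHit (cs : List Char) (j : Nat) : Bool :=
  (pvGroupKws j).any (fun k => PySem.Chars.isIn k.toList cs)

-- the inner loop only ever decreases the running minimum
theorem pvFoldAux_le (cs : List Char) (i : Nat) (L : List (List Char × Nat)) (b : Nat) :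
    L.foldl (fun best e => if e.2 < best && PySem.Chars.startswith (cs.drop i) e.1 then e.2 else best) b ≤ b := by
  induction L generalizing b with
  | nil => exact le_refl b
  | cons e L ih =>
      simp only [List.foldl_cons]
      split
      · rename_i h
        have h1 : e.2 < b := by
          have := h
          simp only [Bool.and_eq_true, decide_eq_true_eq] at this
          exact this.1
        exact le_trans (ih _) (le_of_lt h1)
      · exact ih b

theorem pvFoldAux_le_hit (cs : List Char) (i : Nat) (L : List (List Char × Nat))
    (e : List Char × Nat) (he : e ∈ L) (hhit : PySem.Chars.startswith (cs.drop i) e.1 = true) :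
    ∀ b, L.foldl (fun best e => if e.2 < best && PySem.Chars.startswith (cs.drop i) e.1 then e.2 else best) b ≤ e.2 := by
  induction L with
  | nil => cases he
  | cons e' L ih =>
      intro b
      simp only [List.foldl_cons]
      rcases List.mem_cons.mp he with rfl | he'
      · by_cases hlt : e.2 < b
        · rw [if_pos (by simp [hlt, hhit])]
          exact pvFoldAux_le cs i L e.2
        · rw [if_neg (by simp [hlt])]
          exact le_trans (pvFoldAux_le cs i L b) (Nat.le_of_not_lt hlt)
      · split
        · exact ih he' _
        · exact ih he' b

-- the inner loop's value is the start value or the rank of a keyword hitting at i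
theorem pvFoldAux_mem (cs : List Char) (i : Nat) (L : List (List Char × Nat)) (b : Nat) :
    L.foldl (fun best e => if e.2 < best && PySem.Chars.startswith (cs.drop i) e.1 then e.2 else best) b = b ∨
      ∃ e ∈ L, PySem.Chars.startswith (cs.drop i) e.1 = true ∧
        L.foldl (fun best e => if e.2 < best && PySem.Chars.startswith (cs.drop i) e.1 then e.2 else best) b = e.2 := by
  induction L generalizing b with
  | nil => exact Or.inl rfl
  | cons e L ih =>
      simp only [List.foldl_cons]
      split
      · rename_i h
        have h2 : PySem.Chars.startswith (cs.drop i) e.1 = true := by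
          have := h
          simp only [Bool.and_eq_true] at this
          exact this.2
        rcases ih e.2 with h' | ⟨e', he', hh', hv'⟩
        · exact Or.inr ⟨e, List.mem_cons_self .., h2, h'⟩
        · exact Or.inr ⟨e', List.mem_cons_of_mem _ he', hh', hv'⟩
      · rcases ih b with h' | ⟨e', he', hh', hv'⟩
        · exact Or.inl h'
        · exact Or.inr ⟨e', List.mem_cons_of_mem _ he', hh', hv'⟩

theorem pvInner_le (cs : List Char) (i : Nat) (b : Nat) : pvInner cs i b ≤ b :=
  pvFoldAux_le cs i pvKeywordRank b

-- the outer scan over an arbitrary list of positions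
def pvScan (cs : List Char) (I : List Nat) (b : Nat) : Nat :=
  I.foldl (fun best i => pvInner cs i best) b

theorem pvScan_cons (cs : List Char) (i : Nat) (I : List Nat) (b : Nat) :
    pvScan cs (i :: I) b = pvScan cs I (pvInner cs i b) := by
  simp only [pvScan, List.foldl_cons]

theorem pvScan_le (cs : List Char) (I : List Nat) : ∀ b, pvScan cs I b ≤ b := by
  induction I with
  | nil => exact fun b => le_refl b
  | cons i I ih =>
      intro b
      rw [pvScan_cons]
      exact le_trans (ih _) (pvInner_le cs i b)

theorem pvScan_le_hit (cs : List Char) (I : List Nat) (i : Nat) (hi : i ∈ I)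
    (e : List Char × Nat) (he : e ∈ pvKeywordRank)
    (hhit : PySem.Chars.startswith (cs.drop i) e.1 = true) :
    ∀ b, pvScan cs I b ≤ e.2 := by
  induction I with
  | nil => cases hi
  | cons i' I ih =>
      intro b
      rw [pvScan_cons]
      rcases List.mem_cons.mp hi with rfl | hi'
      · exact le_trans (pvScan_le cs I _) (pvFoldAux_le_hit cs i _ e he hhit b)
      · exact ih hi' _

theorem pvScan_mem (cs : List Char) (I : List Nat) : ∀ b, pvScan cs I b = b ∨
      ∃ i ∈ I, ∃ e ∈ pvKeywordRank, PySem.Chars.startswith (cs.drop i) e.1 = true ∧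
        pvScan cs I b = e.2 := by
  induction I with
  | nil => exact fun b => Or.inl rfl
  | cons i I ih =>
      intro b
      rw [pvScan_cons]
      rcases ih (pvInner cs i b) with h | ⟨i', hi', e', he', hh', hv'⟩
      · rcases pvFoldAux_mem cs i pvKeywordRank b with h' | ⟨e, he, hh, hv⟩
        · exact Or.inl (h.trans h')
        · exact Or.inr ⟨i, List.mem_cons_self .., e, he, hh, h.trans hv⟩
      · exact Or.inr ⟨i', List.mem_cons_of_mem _ hi', e', he', hh', hv'⟩

theorem pvBestRank_eq_scan (cs : List Char) : pvBestRank cs = pvScan cs (List.range cs.length) 7 := rfl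

-- keywords are nonempty and each table entry's keyword belongs to its group's list
theorem pvKeyword_facts : ∀ e ∈ pvKeywordRank, e.1 ≠ [] ∧ ∃ k ∈ pvGroupKws e.2, e.1 = k.toList := by decide

-- occurrence as a substring ↔ a prefix hit at some scanned position
theorem pvHit_iff_isIn (cs : List Char) (e : List Char × Nat) (he : e ∈ pvKeywordRank) :
    (∃ i ∈ List.range cs.length, PySem.Chars.startswith (cs.drop i) e.1 = true) ↔
      PySem.Chars.isIn e.1 cs = true := by
  constructor
  · rintro ⟨i, _, hh⟩
    exact (PySem.Chars.exists_prefix_drop_iff_isIn e.1 cs).mp ⟨i, (PySem.Chars.startswith_iff _ _).mp hh⟩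
  · intro h
    obtain ⟨j, hj⟩ := (PySem.Chars.exists_prefix_drop_iff_isIn e.1 cs).mpr h
    have hne : e.1 ≠ [] := (pvKeyword_facts e he).1
    have hjlt : j < cs.length := by
      by_contra hge
      rw [List.drop_eq_nil_of_le (Nat.le_of_not_lt hge)] at hj
      exact hne (List.prefix_nil.mp hj)
    exact ⟨j, List.mem_range.mpr hjlt, (PySem.Chars.startswith_iff _ _).mpr hj⟩

-- if group g has a match and no earlier group does, the scan's minimum is exactly g
theorem pvBestRank_eq_of (cs : List Char) (g : Nat) (hg : g < 7)
    (hpos : pvGroupHit cs g = true) (hneg : ∀ j, j < g → pvGroupHit cs j = false) :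
    pvBestRank cs = g := by
  rw [pvBestRank_eq_scan]
  obtain ⟨k, hk, hin⟩ := List.any_eq_true.mp hpos
  have hmem : (k.toList, g) ∈ pvKeywordRank := by
    have h : ∀ g' < 7, ∀ k' ∈ pvGroupKws g', (k'.toList, g') ∈ pvKeywordRank := by decide
    exact h g hg k hk
  obtain ⟨i, hi, hh⟩ := (pvHit_iff_isIn cs (k.toList, g) hmem).mpr hin
  have hub : pvScan cs (List.range cs.length) 7 ≤ g :=
    pvScan_le_hit cs _ i hi (k.toList, g) hmem hh 7
  rcases pvScan_mem cs (List.range cs.length) 7 with h7 | ⟨i', hi', e, he, hh', hv⟩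
  · omega
  · have hocc : PySem.Chars.isIn e.1 cs = true :=
      (pvHit_iff_isIn cs e he).mp ⟨i', hi', hh'⟩
    have hge : ¬ e.2 < g := by
      intro hlt
      obtain ⟨k', hk', hek⟩ := (pvKeyword_facts e he).2
      have hfalse := List.any_eq_false.mp (hneg e.2 hlt) k' hk'
      rw [← hek] at hfalse
      exact hfalse hocc
    omega

-- if no group matches at all, the scan's minimum stays at its start value 7
theorem pvBestRank_eq_seven (cs : List Char) (hneg : ∀ j, j < 7 → pvGroupHit cs j = false) :
    pvBestRank cs = 7 := by
  rw [pvBestRank_eq_scan]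
  rcases pvScan_mem cs (List.range cs.length) 7 with h7 | ⟨i, hi, e, he, hh, hv⟩
  · exact h7
  · exfalso
    have hocc : PySem.Chars.isIn e.1 cs = true := (pvHit_iff_isIn cs e he).mp ⟨i, hi, hh⟩
    have hlt : e.2 < 7 := by
      have h : ∀ e' ∈ pvKeywordRank, e'.2 < 7 := by decide
      exact h e he
    obtain ⟨k', hk', hek⟩ := (pvKeyword_facts e he).2
    have hfalse := List.any_eq_false.mp (hneg e.2 hlt) k' hk'
    rw [← hek] at hfalse
    exact hfalse hocc

-- ===== VERDICT (by name: the statement is the Claim_ definition above) =====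
theorem recommend_doctor_py_spec : Claim_equal_recommend_doctor_py := by
  intro disease _
  show recommend_doctor_py disease = recommend_doctor_py_alt disease
  simp only [recommend_doctor_py]
  set d := PySem.Str.lower (if disease == "" then "" else disease) with hd
  have hG : ∀ j, pvGroupHit d.toList j = (pvGroupKws j).any (fun k => PySem.Str.isIn k d) := by
    intro j
    simp [pvGroupHit, PySem.Str.isIn]
  have halt : ∀ g, pvBestRank d.toList = g →
      recommend_doctor_py_alt disease =
        (if g < 7 then pvSpecialists.getD g "General Physician" else "General Physician") := by
    intro g hg
    simp only [recommend_doctor_py_alt, ← hd, hg]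
  split_ifs with h0 h1 h2 h3 h4 h5 h6 h7
  · rw [halt 0 (pvBestRank_eq_of d.toList 0 (by omega) (by rw [hG]; exact h0)
        (fun j hj => absurd hj (Nat.not_lt_zero j)))]
    rfl
  · rw [halt 1 (pvBestRank_eq_of d.toList 1 (by omega) (by rw [hG]; exact h1)
        (by intro j hj; interval_cases j <;> rw [hG] <;> simp only [pvGroupKws] <;> simp_all))]
    rfl
  · rw [halt 2 (pvBestRank_eq_of d.toList 2 (by omega) (by rw [hG]; exact h2)
        (by intro j hj; interval_cases j <;> rw [hG] <;> simp only [pvGroupKws] <;> simp_all))]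
    rfl
  · rw [halt 3 (pvBestRank_eq_of d.toList 3 (by omega) (by rw [hG]; exact h3)
        (by intro j hj; interval_cases j <;> rw [hG] <;> simp only [pvGroupKws] <;> simp_all))]
    rfl
  · rw [halt 4 (pvBestRank_eq_of d.toList 4 (by omega) (by rw [hG]; exact h4)
        (by intro j hj; interval_cases j <;> rw [hG] <;> simp only [pvGroupKws] <;> simp_all))]
    rfl
  · rw [halt 5 (pvBestRank_eq_of d.toList 5 (by omega) (by rw [hG]; exact h5)
        (by intro j hj; interval_cases j <;> rw [hG] <;> simp only [pvGroupKws] <;> simp_all))]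
    rfl
  · rw [halt 6 (pvBestRank_eq_of d.toList 6 (by omega) (by rw [hG]; exact h6)
        (by intro j hj; interval_cases j <;> rw [hG] <;> simp only [pvGroupKws] <;> simp_all))]
    rfl
  · rw [halt 7 (pvBestRank_eq_seven d.toList
        (by intro j hj; interval_cases j <;> rw [hG] <;> simp only [pvGroupKws] <;> simp_all))]
    rfl
  · rw [halt 7 (pvBestRank_eq_seven d.toList
        (by intro j hj; interval_cases j <;> rw [hG] <;> simp only [pvGroupKws] <;> simp_all))]
    rfl
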